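-- pv_equiv track=rewrite | github.com/SilverBomb-Gaming/AI-E-Orchestrator-v1 | ai_e_runtime/unity_action_executor.py | _extract_unity_exit_code
-- ===== SOURCE A (Python) =====
-- def _extract_unity_exit_code(stdout_text: str, stderr_text: str) -> tuple[str, str]:
--     exit_code = ""
--     reason = ""
--     for text in (stdout_text or "", stderr_text or ""):
--         for line in text.splitlines():
--             if line.startswith("UNITY_EXIT_CODE="):
--                 value = line.partition("=")[2].strip()
--                 if value:
--                     exit_code = value
--                 elif not reason:
--                     reason = "wrapper emitted blank UNITY_EXIT_CODE"
--             elif line.startswith("UNITY_EXIT_REASON=") and not reason: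
--                 reason = line.partition("=")[2].strip()
--     if exit_code:
--         return exit_code, reason
--     if not reason:
--         reason = "wrapper did not emit UNITY_EXIT_CODE"
--     return "UNKNOWN", reason
-- ===== SOURCE B (Python) =====
-- _CODE = "UNITY_EXIT_CODE="
-- _REASON = "UNITY_EXIT_REASON="
--
--
-- def _extract_unity_exit_code(stdout_text: str, stderr_text: str) -> tuple[str, str]:
--     lines = (stdout_text or "").splitlines() + (stderr_text or "").splitlines()
--     # exit_code: last UNITY_EXIT_CODE= line with a non-empty stripped value
--     exit_code = ""
--     for line in reversed(lines):
--         if line.startswith(_CODE):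
--             value = line[len(_CODE):].strip()
--             if value:
--                 exit_code = value
--                 break
--     # reason: first event yielding a truthy reason
--     reason = ""
--     for line in lines:
--         if line.startswith(_CODE):
--             if not line[len(_CODE):].strip():
--                 reason = "wrapper emitted blank UNITY_EXIT_CODE"
--                 break
--         elif line.startswith(_REASON):
--             value = line[len(_REASON):].strip()
--             if value:
--                 reason = value
--                 break
--     if exit_code:
--         return exit_code, reason
--     if not reason:
--         reason = "wrapper did not emit UNITY_EXIT_CODE"
--     return "UNKNOWN", reason
-- ===== Notes on version B (the rewrite author's own statement) =====
-- stated objective: alternative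
-- what changed: Replaces A's single stateful fold carrying (exit_code, reason) across both streams with two independent early-exit scans of the concatenated line list: a reversed scan for the last non-blank UNITY_EXIT_CODE value and a forward scan for the first truthy reason event.
import Mathlib
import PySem

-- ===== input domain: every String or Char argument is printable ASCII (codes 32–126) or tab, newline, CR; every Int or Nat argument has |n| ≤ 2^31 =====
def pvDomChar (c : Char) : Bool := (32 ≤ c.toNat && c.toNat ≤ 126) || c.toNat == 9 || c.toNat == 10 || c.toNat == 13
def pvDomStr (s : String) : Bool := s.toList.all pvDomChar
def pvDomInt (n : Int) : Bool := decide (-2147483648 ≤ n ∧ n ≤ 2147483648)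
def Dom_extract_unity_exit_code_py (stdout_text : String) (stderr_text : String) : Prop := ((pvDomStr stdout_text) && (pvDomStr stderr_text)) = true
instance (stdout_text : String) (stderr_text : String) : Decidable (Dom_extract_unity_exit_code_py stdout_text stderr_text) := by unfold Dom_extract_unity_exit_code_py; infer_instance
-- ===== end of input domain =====

-- B splits exit-code and reason into two independent scans of the concatenated line list
-- (a reversed scan with early exit for the last non-blank code, a forward scan with early
-- exit for the first truthy reason) instead of A's single stateful fold; same cost, simpler state.

-- ===== PORT A =====
-- hand port of line.partition("=")[2] for the one-character separator "=": the chars after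
-- the first '=' ("" if absent); exact for this call site.
def pvPartAfterEq : List Char → List Char
  | [] => []
  | c :: cs => if c = '=' then cs else pvPartAfterEq cs

def pvStepA (st : String × String) (line : String) : String × String :=
  if PySem.Str.startswith line "UNITY_EXIT_CODE=" then
    let value := PySem.Str.strip (String.ofList (pvPartAfterEq line.toList))
    if value ≠ "" then (value, st.2)
    else if st.2 = "" then (st.1, "wrapper emitted blank UNITY_EXIT_CODE")
    else st
  else if PySem.Str.startswith line "UNITY_EXIT_REASON=" && (st.2 == "") then
    (st.1, PySem.Str.strip (String.ofList (pvPartAfterEq line.toList)))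
  else st

def extract_unity_exit_code_py (stdout_text : String) (stderr_text : String) : String × String :=
  let st := [stdout_text, stderr_text].foldl
    (fun st text => (PySem.Str.splitlines text).foldl pvStepA st) ("", "")
  if st.1 ≠ "" then st
  else ("UNKNOWN", if st.2 = "" then "wrapper did not emit UNITY_EXIT_CODE" else st.2)

-- ===== PORT B =====
def pvFindExit : List String → String
  | [] => ""
  | line :: rest =>
    if PySem.Str.startswith line "UNITY_EXIT_CODE=" then
      let value := PySem.Str.strip (PySem.Str.slice line (some 16) none)
      if value ≠ "" then value else pvFindExit rest
    else pvFindExit rest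

def pvFindReason : List String → String
  | [] => ""
  | line :: rest =>
    if PySem.Str.startswith line "UNITY_EXIT_CODE=" then
      if PySem.Str.strip (PySem.Str.slice line (some 16) none) = "" then
        "wrapper emitted blank UNITY_EXIT_CODE"
      else pvFindReason rest
    else if PySem.Str.startswith line "UNITY_EXIT_REASON=" then
      let value := PySem.Str.strip (PySem.Str.slice line (some 18) none)
      if value ≠ "" then value else pvFindReason rest
    else pvFindReason rest

def extract_unity_exit_code_py_alt (stdout_text : String) (stderr_text : String) : String × String :=
  let lines := PySem.Str.splitlines stdout_text ++ PySem.Str.splitlines stderr_text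
  let exit_code := pvFindExit lines.reverse
  let reason := pvFindReason lines
  if exit_code ≠ "" then (exit_code, reason)
  else ("UNKNOWN", if reason = "" then "wrapper did not emit UNITY_EXIT_CODE" else reason)

-- ===== PRECONDITION & SPEC =====
def Spec_extract_unity_exit_code_py (stdout_text : String) (stderr_text : String) (out : String × String) : Prop := out = extract_unity_exit_code_py_alt stdout_text stderr_text
instance (stdout_text : String) (stderr_text : String) (out : String × String) : Decidable (Spec_extract_unity_exit_code_py stdout_text stderr_text out) := by unfold Spec_extract_unity_exit_code_py; infer_instance

-- ===== CLAIM (what is proved, stated in full; the proofs are below) =====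
def Claim_equal_extract_unity_exit_code_py : Prop := ∀ (stdout_text : String) (stderr_text : String), Dom_extract_unity_exit_code_py stdout_text stderr_text → Spec_extract_unity_exit_code_py stdout_text stderr_text (extract_unity_exit_code_py stdout_text stderr_text)

-- ===== LEMMAS AND PROOFS =====

-- A's partition("=")[2] and B's [16:] / [18:] agree on lines with the respective prefix.
theorem slice_drop (s : String) (n : Nat) : (PySem.Str.slice s (some (n:Int)) none).toList = s.toList.drop n := by
  simp [PySem.Str.toList_slice, PySem.Chars.slice_eq_listSlice, PySem.List.slice_from_natCast]

theorem partAfter_code {line : String}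
    (h : PySem.Str.startswith line "UNITY_EXIT_CODE=" = true) :
    String.ofList (pvPartAfterEq line.toList) = PySem.Str.slice line (some 16) none := by
  simp only [PySem.Str.startswith_eq] at h
  rw [PySem.Chars.startswith_iff] at h
  obtain ⟨rest, hrest⟩ := h
  have hl : line.toList = "UNITY_EXIT_CODE=".toList ++ rest := hrest.symm
  have : pvPartAfterEq line.toList = (PySem.Str.slice line (some 16) none).toList := by
    rw [show ((16:Int) = ((16:Nat):Int)) by norm_num, slice_drop, hl]
    show pvPartAfterEq (['U','N','I','T','Y','_','E','X','I','T','_','C','O','D','E','='] ++ rest) = _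
    simp [pvPartAfterEq]
  rw [this, String.ofList_toList]

theorem partAfter_reason {line : String}
    (h : PySem.Str.startswith line "UNITY_EXIT_REASON=" = true) :
    String.ofList (pvPartAfterEq line.toList) = PySem.Str.slice line (some 18) none := by
  simp only [PySem.Str.startswith_eq] at h
  rw [PySem.Chars.startswith_iff] at h
  obtain ⟨rest, hrest⟩ := h
  have hl : line.toList = "UNITY_EXIT_REASON=".toList ++ rest := hrest.symm
  have : pvPartAfterEq line.toList = (PySem.Str.slice line (some 18) none).toList := by
    rw [show ((18:Int) = ((18:Nat):Int)) by norm_num, slice_drop, hl]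
    show pvPartAfterEq (['U','N','I','T','Y','_','E','X','I','T','_','R','E','A','S','O','N','='] ++ rest) = _
    simp [pvPartAfterEq]
  rw [this, String.ofList_toList]

theorem findExit_append (xs ys : List String) :
    pvFindExit (xs ++ ys) = if pvFindExit xs = "" then pvFindExit ys else pvFindExit xs := by
  induction xs with
  | nil => simp [pvFindExit]
  | cons l xs ih =>
    simp only [List.cons_append, pvFindExit]
    split_ifs <;> simp_all [ih]

theorem findReason_append (xs ys : List String) :
    pvFindReason (xs ++ ys) = if pvFindReason xs = "" then pvFindReason ys else pvFindReason xs := by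
  induction xs with
  | nil => simp [pvFindReason]
  | cons l xs ih =>
    simp only [List.cons_append, pvFindReason]
    split_ifs <;> simp_all [ih]

theorem foldA_eq (L : List String) (c r : String) :
    L.foldl pvStepA (c, r) =
      (if pvFindExit L.reverse = "" then c else pvFindExit L.reverse,
       if r = "" then pvFindReason L else r) := by
  induction L generalizing c r with
  | nil =>
    simp only [List.foldl_nil, List.reverse_nil, pvFindExit, pvFindReason]
    split_ifs with h <;> simp_all
  | cons l L ih =>
    simp only [List.foldl_cons, List.reverse_cons, findExit_append]
    by_cases hc : PySem.Str.startswith l "UNITY_EXIT_CODE=" = true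
    · have hc2 := hc; simp at hc2
      by_cases hv : PySem.Str.strip (PySem.Str.slice l (some 16) none) = ""
      · by_cases hr : r = ""
        · simp [pvStepA, hc2, partAfter_code hc, hv, hr, ih, pvFindExit, pvFindReason]
          try (split_ifs <;> simp_all)
        · simp [pvStepA, hc2, partAfter_code hc, hv, hr, ih, pvFindExit, pvFindReason]
          try (split_ifs <;> simp_all)
      · simp [pvStepA, hc2, partAfter_code hc, hv, ih, pvFindExit, pvFindReason]
        try (split_ifs <;> simp_all)
    · have hc2 := hc; simp at hc2
      by_cases hrs : PySem.Str.startswith l "UNITY_EXIT_REASON=" = true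
      · have hrs2 := hrs; simp at hrs2
        by_cases hr : r = ""
        · by_cases hv : PySem.Str.strip (PySem.Str.slice l (some 18) none) = ""
          · simp [pvStepA, hc2, hrs2, partAfter_reason hrs, hv, hr, ih, pvFindExit, pvFindReason]
            try (split_ifs <;> simp_all)
          · simp [pvStepA, hc2, hrs2, partAfter_reason hrs, hv, hr, ih, pvFindExit, pvFindReason]
            try (split_ifs <;> simp_all)
        · simp [pvStepA, hc2, hrs2, hr, ih, pvFindExit, pvFindReason]
          try (split_ifs <;> simp_all)
      · have hrs2 := hrs; simp at hrs2
        by_cases hr : r = ""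
        · simp [pvStepA, hc2, hrs2, hr, ih, pvFindExit, pvFindReason]
          try (split_ifs <;> simp_all)
        · simp [pvStepA, hc2, hrs2, hr, ih, pvFindExit, pvFindReason]
          try (split_ifs <;> simp_all)

-- ===== VERDICT (by name: the statement is the Claim_ definition above) =====
theorem extract_unity_exit_code_py_spec : Claim_equal_extract_unity_exit_code_py := by
  intro s e _
  show extract_unity_exit_code_py s e = extract_unity_exit_code_py_alt s e
  simp only [extract_unity_exit_code_py, extract_unity_exit_code_py_alt,
    List.foldl_cons, List.foldl_nil, foldA_eq, List.reverse_append,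
    findExit_append, findReason_append]
  split_ifs <;> simp_all
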